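-- pv_equiv track=rewrite | github.com/mangafan92/ProblemSolvingPython | 050-099/061.py | polygonalNumbersWithNDigits
-- ===== SOURCE A (Python) =====
-- def polygonalNumber(n: int, figure: int) -> int:
--     functions = {
--         3: lambda n: n * (n + 1) // 2,
--         4: lambda n: n ** 2,
--         5: lambda n: n * (3 * n - 1) // 2,
--         6: lambda n: n * (2 * n - 1),
--         7: lambda n: n * (5 * n - 3) // 2,
--         8: lambda n: n * (3 * n - 2)
--     }
--     return functions[figure](n)
--
-- def polygonalNumbersWithNDigits(figure: int, digits: int) -> list:
--     numbers = list()
--     i = 0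
--
--     while polygonalNumber(i, figure) <= 10 ** (digits - 1):
--         i += 1
--
--     while polygonalNumber(i, figure) < 10 ** digits:
--         numbers.append(polygonalNumber(i, figure))
--         i += 1
--     return numbers
-- ===== SOURCE B (Python) =====
-- def polygonalNumber(n: int, figure: int) -> int:
--     functions = {
--         3: lambda n: n * (n + 1) // 2,
--         4: lambda n: n ** 2,
--         5: lambda n: n * (3 * n - 1) // 2,
--         6: lambda n: n * (2 * n - 1),
--         7: lambda n: n * (5 * n - 3) // 2,
--         8: lambda n: n * (3 * n - 2)
--     }
--     return functions[figure](n)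
--
-- def polygonalNumbersWithNDigits(figure: int, digits: int) -> list:
--     def least_above(k):
--         # smallest index i (>= 1) with polygonalNumber(i, figure) > k,
--         # found by doubling an upper bracket then bisecting.
--         hi = 1
--         while polygonalNumber(hi, figure) <= k:
--             hi *= 2
--         lo = 0  # polygonalNumber(0, figure) == 0 <= k whenever the bisection runs
--         while lo + 1 < hi:
--             mid = (lo + hi) // 2
--             if polygonalNumber(mid, figure) <= k:
--                 lo = mid
--             else:
--                 hi = mid
--         return hi
--
--     start = least_above(10 ** (digits - 1))
--     end = least_above(10 ** digits - 1)
--     return [polygonalNumber(i, figure) for i in range(start, end)]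
-- ===== Notes on version B (the rewrite author's own statement) =====
-- stated objective: faster
-- what changed: Replaces A's linear index scan for the first polygonal number above 10**(digits-1) with a doubling+bisection search, and replaces the second append-while loop with a single list comprehension over range(start, end), where end is found by the same binary search; this calls polygonalNumber once per emitted element instead of three times.
import Mathlib
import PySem

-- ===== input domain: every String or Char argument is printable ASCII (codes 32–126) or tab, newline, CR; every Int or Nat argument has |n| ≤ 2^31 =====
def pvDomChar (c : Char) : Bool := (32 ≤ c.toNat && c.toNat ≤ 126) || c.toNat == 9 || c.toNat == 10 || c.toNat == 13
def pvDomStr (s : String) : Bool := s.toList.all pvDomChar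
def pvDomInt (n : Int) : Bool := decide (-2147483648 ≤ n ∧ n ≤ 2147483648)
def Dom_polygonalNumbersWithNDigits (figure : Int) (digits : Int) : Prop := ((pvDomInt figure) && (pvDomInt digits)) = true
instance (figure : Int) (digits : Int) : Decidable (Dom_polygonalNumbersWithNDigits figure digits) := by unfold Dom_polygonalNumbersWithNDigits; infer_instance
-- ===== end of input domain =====

-- B replaces A's linear start scan by a doubling + bisection search for the first index whose
-- polygonal number exceeds the threshold, and emits the list as a map over the index range
-- (objective: faster, constant factor — one polygonalNumber call per element instead of three).
-- Both loop ports use a Nat fuel argument only to make the same computation total; the proofs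
-- below show the fuel supplied is always sufficient.

-- ===== PORT A =====
-- polygonalNumber's dict of lambdas, ported as an if-chain; none = KeyError for a figure not in 3..8.
def polyV (figure : Int) (n : Int) : Int :=
  if figure = 3 then PySem.Int.floordiv (n * (n + 1)) 2
  else if figure = 4 then n ^ 2
  else if figure = 5 then PySem.Int.floordiv (n * (3 * n - 1)) 2
  else if figure = 6 then n * (2 * n - 1)
  else if figure = 7 then PySem.Int.floordiv (n * (5 * n - 3)) 2
  else if figure = 8 then n * (3 * n - 2)
  else 0

def polygonalNumber? (n : Int) (figure : Int) : Option Int :=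
  if 3 ≤ figure ∧ figure ≤ 8 then some (polyV figure n) else none

-- lower threshold 10**(digits-1): for digits ≤ 0 Python's value is the float 10.0**(digits-1) ∈ (0,1);
-- every compared value polygonalNumber(i,·) is an integer ≥ 0, so 'v <= 10.0**(digits-1)' ↔ 'v ≤ 0'. Exact.
def pvLow (digits : Int) : Int := if 1 ≤ digits then 10 ^ (digits - 1).toNat else 0
-- upper threshold 10**digits: for digits < 0 it is a float in (0,1); every value actually compared against
-- it belongs to an index i ≥ 1 and so is ≥ 1, making 'v < 10.0**digits' ↔ 'v < 0'. Exact on every comparison made.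
def pvHigh (digits : Int) : Int := if 0 ≤ digits then 10 ^ digits.toNat else 0

-- first while loop: scan i upward while polygonalNumber(i, figure) <= low (fuel only for totality)
def scanStart (figure : Int) (K : Int) : Nat → Int → Int
  | 0, i => i
  | fuel + 1, i => if polyV figure i ≤ K then scanStart figure K fuel (i + 1) else i

-- second while loop: append polygonalNumber(i, figure) while it is < high (fuel only for totality)
def emitLoop (figure : Int) (H : Int) : Nat → Int → List Int
  | 0, _ => []
  | fuel + 1, i => if polyV figure i < H then polyV figure i :: emitLoop figure H fuel (i + 1) else []

def polygonalNumbersWithNDigits (figure : Int) (digits : Int) : List Int :=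
  match polygonalNumber? 0 figure with
  | none => []  -- KeyError at the very first call; excluded by Pre_
  | some _ =>
    emitLoop figure (pvHigh digits) (pvHigh digits + 1).toNat
      (scanStart figure (pvLow digits) (pvLow digits + 2).toNat 0)

-- ===== PORT B =====
-- doubling phase of least_above: hi = 1; while polygonalNumber(hi, figure) <= k: hi *= 2 (fuel only for totality)
def bDouble (figure : Int) (K : Int) : Nat → Int → Int
  | 0, hi => hi
  | fuel + 1, hi => if polyV figure hi ≤ K then bDouble figure K fuel (2 * hi) else hi

-- bisection phase: while lo + 1 < hi: mid = (lo + hi) // 2; … (fuel only for totality)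
def bSearch (figure : Int) (K : Int) : Nat → Int → Int → Int
  | 0, _, hi => hi
  | fuel + 1, lo, hi =>
    if lo + 1 < hi then
      let mid := PySem.Int.floordiv (lo + hi) 2
      if polyV figure mid ≤ K then bSearch figure K fuel mid hi else bSearch figure K fuel lo mid
    else hi

def leastAbove (figure : Int) (K : Int) : Int :=
  let d := bDouble figure K (K + 1).toNat 1
  bSearch figure K d.toNat 0 d

def polygonalNumbersWithNDigits_alt (figure : Int) (digits : Int) : List Int :=
  if 3 ≤ figure ∧ figure ≤ 8 then  -- otherwise KeyError inside least_above; excluded by Pre_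
    (PySem.List.pyRange (leastAbove figure (pvLow digits))
      (leastAbove figure (pvHigh digits - 1)) 1).map (polyV figure)
  else []

-- ===== PRECONDITION & SPEC =====
-- Pre_ excludes figures outside 3..8, on which polygonalNumber raises KeyError.
def Pre_polygonalNumbersWithNDigits (figure : Int) (digits : Int) : Prop := 3 ≤ figure ∧ figure ≤ 8
instance (figure : Int) (digits : Int) : Decidable (Pre_polygonalNumbersWithNDigits figure digits) := by unfold Pre_polygonalNumbersWithNDigits; infer_instance
def pvWitness_polygonalNumbersWithNDigits : Int × Int := (3, 2)

def Spec_polygonalNumbersWithNDigits (figure : Int) (digits : Int) (out : List Int) : Prop := out = polygonalNumbersWithNDigits_alt figure digits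
instance (figure : Int) (digits : Int) (out : List Int) : Decidable (Spec_polygonalNumbersWithNDigits figure digits out) := by unfold Spec_polygonalNumbersWithNDigits; infer_instance

-- ===== CLAIM (what is proved, stated in full; the proofs are below) =====
def Claim_equal_polygonalNumbersWithNDigits : Prop := ∀ (figure : Int) (digits : Int), Dom_polygonalNumbersWithNDigits figure digits → Pre_polygonalNumbersWithNDigits figure digits → Spec_polygonalNumbersWithNDigits figure digits (polygonalNumbersWithNDigits figure digits)

-- ===== LEMMAS AND PROOFS =====

theorem polyV_zero (figure : Int) (h : 3 ≤ figure ∧ figure ≤ 8) : polyV figure 0 = 0 := by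
  have h10 : figure = 3 ∨ figure = 4 ∨ figure = 5 ∨ figure = 6 ∨ figure = 7 ∨ figure = 8 := by omega
  rcases h10 with h'|h'|h'|h'|h'|h' <;> subst h' <;> decide

theorem polyV_one (figure : Int) (h : 3 ≤ figure ∧ figure ≤ 8) : polyV figure 1 = 1 := by
  have h10 : figure = 3 ∨ figure = 4 ∨ figure = 5 ∨ figure = 6 ∨ figure = 7 ∨ figure = 8 := by omega
  rcases h10 with h'|h'|h'|h'|h'|h' <;> subst h' <;> decide

theorem polyV_succ_gt (figure : Int) (h : 3 ≤ figure ∧ figure ≤ 8) (n : Int) (hn : 0 ≤ n) :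
    polyV figure n < polyV figure (n + 1) := by
  have key : ∀ a c : Int, 0 ≤ a → 1 ≤ c → a / 2 < (a + 2 * c) / 2 := by intro a c h1 h2; omega
  have h10 : figure = 3 ∨ figure = 4 ∨ figure = 5 ∨ figure = 6 ∨ figure = 7 ∨ figure = 8 := by omega
  rcases h10 with h'|h'|h'|h'|h'|h' <;> subst h' <;> simp only [polyV, if_true] <;> norm_num
  · have e : (n + 1) * (n + 1 + 1) = n * (n + 1) + 2 * (n + 1) := by ring
    rw [e]; exact key _ _ (by nlinarith) (by omega)
  · nlinarith [Int.le_self_sq n]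
  · have hp : 0 ≤ n * (3 * n - 1) := by nlinarith [Int.le_self_sq n]
    have e : (n + 1) * (3 * (n + 1) - 1) = n * (3 * n - 1) + 2 * (3 * n + 1) := by ring
    rw [e]; exact key _ _ hp (by omega)
  · nlinarith [Int.le_self_sq n]
  · have hp : 0 ≤ n * (5 * n - 3) := by nlinarith [Int.le_self_sq n]
    have e : (n + 1) * (5 * (n + 1) - 3) = n * (5 * n - 3) + 2 * (5 * n + 1) := by ring
    rw [e]; exact key _ _ hp (by omega)
  · nlinarith [Int.le_self_sq n]

theorem polyV_ge_self (figure : Int) (h : 3 ≤ figure ∧ figure ≤ 8) (n : Int) (hn : 0 ≤ n) :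
    n ≤ polyV figure n := by
  obtain ⟨m, hm⟩ := Int.le.dest hn
  have hnm : n = (m : Int) := by omega
  subst hnm
  clear hm
  induction m with
  | zero => norm_num [polyV_zero figure h]
  | succ k ih =>
    have hk : ((k : Int)) ≤ polyV figure k := ih (by positivity)
    have := polyV_succ_gt figure h k (by positivity)
    push_cast
    push_cast at hk
    omega

theorem polyV_mono (figure : Int) (h : 3 ≤ figure ∧ figure ≤ 8) (a b : Int) (ha : 0 ≤ a)
    (hab : a ≤ b) : polyV figure a ≤ polyV figure b := by
  obtain ⟨k, hk⟩ := Int.le.dest hab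
  clear hab
  induction k generalizing b with
  | zero =>
    have hb : b = a := by omega
    subst hb; exact le_rfl
  | succ m ih =>
    have hb : b = a + m + 1 := by push_cast at hk; omega
    subst hb
    have h1 : polyV figure a ≤ polyV figure (a + m) := ih (a + m) rfl
    have h2 := polyV_succ_gt figure h (a + m) (by positivity)
    omega

-- characterisation of A's first while loop: with sufficient fuel it returns the least index above K
theorem scanStart_spec (figure : Int) (h : 3 ≤ figure ∧ figure ≤ 8) (K : Int) :
    ∀ (fuel : Nat) (i : Int), 0 ≤ i → K + 2 ≤ i + fuel →
    (∀ j, 0 ≤ j → j < i → polyV figure j ≤ K) →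
    0 ≤ scanStart figure K fuel i ∧ K < polyV figure (scanStart figure K fuel i) ∧
      ∀ j, 0 ≤ j → j < scanStart figure K fuel i → polyV figure j ≤ K := by
  intro fuel
  induction fuel with
  | zero =>
    intro i hi hfuel hinv
    have := polyV_ge_self figure h i hi
    exact ⟨hi, by simp [scanStart]; omega, by simpa [scanStart] using hinv⟩
  | succ m ih =>
    intro i hi hfuel hinv
    rw [scanStart]
    split
    · next hcond =>
      have hKi : i ≤ K := le_trans (polyV_ge_self figure h i hi) hcond
      exact ih (i + 1) (by omega) (by push_cast at hfuel ⊢; omega) (fun j hj0 hj1 => by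
        rcases lt_or_ge j i with hlt | hge
        · exact hinv j hj0 hlt
        · have : j = i := by omega
          subst this; exact hcond)
    · next hcond => exact ⟨hi, by omega, hinv⟩

-- B's doubling phase reaches an index whose value exceeds K (fuel sufficient)
theorem bDouble_spec (figure : Int) (h : 3 ≤ figure ∧ figure ≤ 8) (K : Int) :
    ∀ (fuel : Nat) (hi : Int), 1 ≤ hi → K + 2 ≤ hi + fuel →
    1 ≤ bDouble figure K fuel hi ∧ K < polyV figure (bDouble figure K fuel hi) := by
  intro fuel
  induction fuel with
  | zero =>
    intro hi h1 hfuel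
    have := polyV_ge_self figure h hi (by omega)
    exact ⟨by simpa [bDouble] using h1, by simp [bDouble]; omega⟩
  | succ m ih =>
    intro hi h1 hfuel
    rw [bDouble]
    split
    · next hcond =>
      have := polyV_ge_self figure h hi (by omega)
      exact ih (2 * hi) (by omega) (by push_cast at hfuel ⊢; omega)
    · next hcond => exact ⟨h1, by omega⟩

-- B's bisection keeps the bracket invariant and lands on the least index above K (fuel sufficient)
theorem bSearch_spec (figure : Int) (K : Int) :
    ∀ (fuel : Nat) (lo hi : Int), polyV figure lo ≤ K → K < polyV figure hi → lo < hi →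
    hi ≤ lo + fuel + 1 →
    lo < bSearch figure K fuel lo hi ∧ bSearch figure K fuel lo hi ≤ hi ∧
      K < polyV figure (bSearch figure K fuel lo hi) ∧
      polyV figure (bSearch figure K fuel lo hi - 1) ≤ K := by
  intro fuel
  induction fuel with
  | zero =>
    intro lo hi hlo hhi hlh hfuel
    have heq : hi - 1 = lo := by omega
    simp only [bSearch]
    rw [heq]
    exact ⟨hlh, le_rfl, hhi, hlo⟩
  | succ m ih =>
    intro lo hi hlo hhi hlh hfuel
    by_cases hrec : lo + 1 < hi
    · have hm := PySem.Int.floordiv_two_mid_bounds (lo := lo + 1) (hi := hi - 1) (by omega)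
      have e : lo + 1 + (hi - 1) = lo + hi := by ring
      rw [e] at hm
      by_cases hcond : polyV figure (PySem.Int.floordiv (lo + hi) 2) ≤ K
      · simp only [bSearch, if_pos hrec, if_pos hcond]
        have := ih _ hi hcond hhi (by omega) (by push_cast at hfuel ⊢; omega)
        omega
      · simp only [bSearch, if_pos hrec, if_neg hcond]
        have := ih lo (PySem.Int.floordiv (lo + hi) 2) hlo (by omega) (by omega) (by push_cast at hfuel ⊢; omega)
        omega
    · have heq : hi - 1 = lo := by omega
      simp only [bSearch, if_neg hrec]
      rw [heq]
      exact ⟨hlh, le_rfl, hhi, hlo⟩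

-- the least index above a threshold is unique
theorem least_unique (figure : Int) (K r1 r2 : Int)
    (h1a : 0 ≤ r1) (h1b : K < polyV figure r1) (h1c : ∀ j, 0 ≤ j → j < r1 → polyV figure j ≤ K)
    (h2a : 0 ≤ r2) (h2b : K < polyV figure r2) (h2c : ∀ j, 0 ≤ j → j < r2 → polyV figure j ≤ K) :
    r1 = r2 := by
  rcases lt_trichotomy r1 r2 with hlt | he | hgt
  · exact absurd (h2c r1 h1a hlt) (by omega)
  · exact he
  · exact absurd (h1c r2 h2a hgt) (by omega)

-- for a nonnegative threshold, B's least_above is the least index whose value exceeds K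
theorem leastAbove_spec (figure : Int) (h : 3 ≤ figure ∧ figure ≤ 8) (K : Int) (hK : 0 ≤ K) :
    0 ≤ leastAbove figure K ∧ K < polyV figure (leastAbove figure K) ∧
      ∀ j, 0 ≤ j → j < leastAbove figure K → polyV figure j ≤ K := by
  obtain ⟨hd1, hd2⟩ := bDouble_spec figure h K (K + 1).toNat 1 (by omega) (by omega)
  have hlo : polyV figure 0 ≤ K := by rw [polyV_zero figure h]; exact hK
  obtain ⟨hs1, hs2, hs3, hs4⟩ := bSearch_spec figure K (bDouble figure K (K + 1).toNat 1).toNat 0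
    (bDouble figure K (K + 1).toNat 1) hlo hd2 (by omega) (by omega)
  refine ⟨by simp only [leastAbove]; omega, by simp only [leastAbove]; exact hs3, ?_⟩
  intro j hj0 hjlt
  simp only [leastAbove] at hjlt
  calc polyV figure j
      ≤ polyV figure (bSearch figure K (bDouble figure K (K + 1).toNat 1).toNat 0
          (bDouble figure K (K + 1).toNat 1) - 1) := polyV_mono figure h j _ hj0 (by omega)
    _ ≤ K := hs4

theorem leastAbove_eq_scanStart (figure : Int) (h : 3 ≤ figure ∧ figure ≤ 8) (K : Int) (hK : 0 ≤ K) :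
    leastAbove figure K = scanStart figure K (K + 2).toNat 0 := by
  obtain ⟨a1, a2, a3⟩ := leastAbove_spec figure h K hK
  obtain ⟨b1, b2, b3⟩ := scanStart_spec figure h K (K + 2).toNat 0 (by omega) (by omega)
    (fun j hj0 hj1 => by omega)
  exact least_unique figure K _ _ a1 a2 a3 b1 b2 b3

-- A's emit loop is the map of polyV over the index range up to the first index reaching H
theorem emit_eq (figure : Int) (h : 3 ≤ figure ∧ figure ≤ 8) (H : Int) :
    ∀ (fuel : Nat) (i e : Int), 0 ≤ i → H + 1 ≤ i + fuel → i ≤ e →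
      (∀ j, i ≤ j → j < e → polyV figure j < H) → H ≤ polyV figure e →
      emitLoop figure H fuel i = (PySem.List.pyRange i e 1).map (polyV figure) := by
  intro fuel
  induction fuel with
  | zero =>
    intro i e hi hfuel hie hlt hge
    have hp := polyV_ge_self figure h i hi
    have he : e = i := by
      by_contra hc
      have := hlt i le_rfl (by omega)
      omega
    subst he
    rw [PySem.List.pyRange_one_eq_nil (by omega)]
    rfl
  | succ m ih =>
    intro i e hi hfuel hie hlt hge
    rw [emitLoop]
    split
    · next hcond =>
      have hilt : i < e := by
        by_contra hc
        have : e = i := by omega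
        subst this; omega
      rw [PySem.List.pyRange_one_cons hilt, List.map_cons]
      congr 1
      exact ih (i + 1) e (by omega) (by push_cast at hfuel ⊢; omega) (by omega)
        (fun j hj0 hj1 => hlt j (by omega) hj1) hge
    · next hcond =>
      have he : e = i := by
        by_contra hc
        have := hlt i le_rfl (by omega)
        omega
      subst he
      rw [PySem.List.pyRange_one_eq_nil (by omega)]
      rfl

-- ===== VERDICT (by name: the statement is the Claim_ definition above) =====
theorem polygonalNumbersWithNDigits_spec : Claim_equal_polygonalNumbersWithNDigits := by
  intro figure digits _ hpre
  unfold Spec_polygonalNumbersWithNDigits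
  have h : 3 ≤ figure ∧ figure ≤ 8 := hpre
  simp only [polygonalNumbersWithNDigits, polygonalNumbersWithNDigits_alt, polygonalNumber?,
    if_pos h]
  have hlow : 0 ≤ pvLow digits := by unfold pvLow; split <;> positivity
  rw [← leastAbove_eq_scanStart figure h (pvLow digits) hlow]
  rcases le_or_gt 0 digits with hd | hd
  · -- digits ≥ 0: both thresholds are genuine integer powers of ten
    have hH : pvHigh digits = 10 ^ digits.toNat := by unfold pvHigh; rw [if_pos hd]
    have hHpos : 1 ≤ pvHigh digits := by rw [hH]; exact one_le_pow₀ (by norm_num)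
    obtain ⟨s1, s2, s3⟩ := leastAbove_spec figure h (pvLow digits) hlow
    obtain ⟨e1, e2, e3⟩ := leastAbove_spec figure h (pvHigh digits - 1) (by omega)
    have hlowlt : pvLow digits ≤ pvHigh digits - 1 := by
      unfold pvLow
      rcases le_or_gt 1 digits with hd1 | hd1
      · rw [if_pos hd1, hH]
        have ht : digits.toNat = (digits - 1).toNat + 1 := by omega
        rw [ht, pow_succ]
        have : 1 ≤ (10:Int) ^ (digits - 1).toNat := one_le_pow₀ (by norm_num)
        omega
      · rw [if_neg (by omega)]; omega
    have hse : leastAbove figure (pvLow digits) ≤ leastAbove figure (pvHigh digits - 1) := by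
      by_contra hc
      have := s3 _ e1 (by omega)
      omega
    exact emit_eq figure h (pvHigh digits) (pvHigh digits + 1).toNat _ _ s1 (by omega) hse
      (fun j hj0 hj1 => by have := e3 j (by omega) hj1; omega) (by omega)
  · -- digits < 0: Python's float thresholds make both loops trivial; both sides are empty
    have hH0 : pvHigh digits = 0 := by unfold pvHigh; rw [if_neg (by omega)]
    have hs : leastAbove figure (pvLow digits) = 1 := by
      obtain ⟨a1, a2, a3⟩ := leastAbove_spec figure h (pvLow digits) hlow
      have hlow0 : pvLow digits = 0 := by unfold pvLow; rw [if_neg (by omega)]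
      refine least_unique figure (pvLow digits) _ 1 a1 a2 a3 (by omega) ?_ ?_
      · rw [polyV_one figure h]; omega
      · intro j hj0 hj1
        have hj : j = 0 := by omega
        subst hj; rw [polyV_zero figure h]; omega
    have he : leastAbove figure (pvHigh digits - 1) = 1 := by
      rw [hH0]
      show bSearch figure ((0:Int) - 1) (bDouble figure ((0:Int) - 1) ((0:Int) - 1 + 1).toNat 1).toNat 0
        (bDouble figure ((0:Int) - 1) ((0:Int) - 1 + 1).toNat 1) = 1
      norm_num [bDouble, bSearch]
    rw [hs, he, hH0]
    rw [show ((0:Int) + 1).toNat = 1 from rfl, emitLoop,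
      if_neg (by rw [polyV_one figure h]; omega), PySem.List.pyRange_one_eq_nil (by omega)]
    rfl
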